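-- pv_equiv track=rewrite | github.com/nathansaccon/CS116-Completed-Assignments | Assignment 07/a07q2.py | smallest_diff
-- ===== SOURCE A (Python) =====
-- def smallest_diff(numbers):
--     mid = len(numbers) // 2
--     L1 = numbers[:mid+1]
--     L2 = numbers[mid:]
--     if len(numbers) == 0 or len(numbers) == 1:
--         return 0
--     if len(numbers) == 2:
--         return abs(numbers[0] - numbers[1])
--     else:
--         return min(smallest_diff(L1),smallest_diff(L2))
-- ===== SOURCE B (Python) =====
-- def smallest_diff(numbers):
--     # single linear pass over adjacent pairs instead of A's divide-and-conquer recursion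
--     if len(numbers) < 2:
--         return 0
--     best = abs(numbers[1] - numbers[0])
--     prev = numbers[1]
--     for x in numbers[2:]:
--         d = abs(x - prev)
--         if d < best:
--             best = d
--         prev = x
--     return best
-- ===== Notes on version B (the rewrite author's own statement) =====
-- stated objective: faster
-- what changed: replaces A's overlapping-halves divide-and-conquer recursion by a single linear pass keeping the running minimum of adjacent absolute differences
import Mathlib
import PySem

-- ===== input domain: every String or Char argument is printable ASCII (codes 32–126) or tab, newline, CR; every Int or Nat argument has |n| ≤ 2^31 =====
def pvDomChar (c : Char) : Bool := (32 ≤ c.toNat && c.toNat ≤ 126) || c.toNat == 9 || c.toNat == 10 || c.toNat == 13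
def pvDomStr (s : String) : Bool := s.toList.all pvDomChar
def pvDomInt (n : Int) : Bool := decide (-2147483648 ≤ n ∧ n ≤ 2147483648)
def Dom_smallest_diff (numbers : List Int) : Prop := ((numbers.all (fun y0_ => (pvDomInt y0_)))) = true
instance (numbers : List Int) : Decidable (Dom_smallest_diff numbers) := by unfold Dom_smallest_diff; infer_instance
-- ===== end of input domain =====

-- B replaces A's overlapping-halves divide-and-conquer recursion with one linear pass over adjacent pairs.

-- ===== PORT A =====
def smallest_diff (numbers : List Int) : Int :=
  let mid := PySem.Int.floordiv (numbers.length : Int) 2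
  let L1 := PySem.List.slice numbers none (some (mid + 1))
  let L2 := PySem.List.slice numbers (some mid) none
  if numbers.length = 0 ∨ numbers.length = 1 then 0
  else if numbers.length = 2 then |numbers.getD 0 0 - numbers.getD 1 0|
  else min (smallest_diff L1) (smallest_diff L2)
termination_by numbers.length
decreasing_by
  all_goals
    have hm : PySem.Int.floordiv (numbers.length : Int) 2 = ((numbers.length / 2 : Nat) : Int) := by
      exact_mod_cast PySem.Int.floordiv_natCast numbers.length 2
  · rw [hm, show ((numbers.length / 2 : Nat) : Int) + 1 = (((numbers.length / 2 + 1 : Nat)) : Int) by push_cast; ring,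
      PySem.List.slice_to_natCast]
    simp only [List.length_take]
    omega
  · rw [hm, PySem.List.slice_from_natCast]
    simp only [List.length_drop]
    omega

-- ===== PORT B =====
-- the 'for x in numbers[2:]' loop of Source B, carrying (best, prev)
def sdLoop (best : Int) (prev : Int) : List Int → Int
  | [] => best
  | x :: rest => sdLoop (if |x - prev| < best then |x - prev| else best) x rest

def smallest_diff_alt (numbers : List Int) : Int :=
  match numbers with
  | a :: b :: rest => sdLoop |b - a| b rest
  | _ => 0

-- ===== PRECONDITION & SPEC =====
def Spec_smallest_diff (numbers : List Int) (out : Int) : Prop := out = smallest_diff_alt numbers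
instance (numbers : List Int) (out : Int) : Decidable (Spec_smallest_diff numbers out) := by unfold Spec_smallest_diff; infer_instance

-- ===== CLAIM (what is proved, stated in full; the proofs are below) =====
def Claim_equal_smallest_diff : Prop := ∀ (numbers : List Int), Dom_smallest_diff numbers → Spec_smallest_diff numbers (smallest_diff numbers)

-- ===== LEMMAS AND PROOFS =====

-- list of absolute differences of adjacent elements
def dl : List Int → List Int
  | a :: b :: t => |a - b| :: dl (b :: t)
  | _ => []

theorem dl_length (xs : List Int) : (dl xs).length = xs.length - 1 := by
  match xs with
  | [] => simp [dl]
  | [a] => simp [dl]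
  | a :: b :: t => simp [dl, dl_length (b :: t)]

-- minimum of a nonempty list (0 on [])
def minNE : List Int → Int
  | [] => 0
  | d :: ds => List.foldl min d ds

theorem foldl_min_pull (c e : Int) (l : List Int) :
    List.foldl min (min c e) l = min c (List.foldl min e l) := by
  induction l generalizing e with
  | nil => simp
  | cons x t ih => simp only [List.foldl, min_assoc, ih]

theorem minNE_append (l1 l2 : List Int) (h1 : l1 ≠ []) (h2 : l2 ≠ []) :
    minNE (l1 ++ l2) = min (minNE l1) (minNE l2) := by
  match l1, l2 with
  | d :: ds, e :: es =>
    simp only [minNE, List.cons_append, List.foldl_append, List.foldl_cons]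
    rw [foldl_min_pull (List.foldl min d ds) e es]

-- splitting the adjacent-difference list at an overlap point
theorem dl_split (xs : List Int) (k : Nat) (hk : 1 ≤ k) (hk2 : k + 1 ≤ xs.length) :
    dl (xs.take (k + 1)) ++ dl (xs.drop k) = dl xs := by
  match xs, k with
  | a :: b :: t, 1 => simp [dl]
  | a :: b :: t, (k + 2) =>
    have ih := dl_split (b :: t) (k + 1) (by omega) (by simp at hk2 ⊢; omega)
    simp only [List.take_succ_cons, List.drop_succ_cons] at ih ⊢
    rw [show dl (a :: b :: t.take (k + 1)) = |a - b| :: dl (b :: t.take (k + 1)) from rfl,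
      show dl (a :: b :: t) = |a - b| :: dl (b :: t) from rfl, List.cons_append, ← ih]
  | [_], _ => simp at hk2; omega
  | [], _ => simp at hk2

theorem A_eq_minNE (xs : List Int) (h : 2 ≤ xs.length) :
    smallest_diff xs = minNE (dl xs) := by
  match xs with
  | a :: b :: t =>
    have hl : (a :: b :: t).length = t.length + 2 := by simp
    rw [smallest_diff]
    by_cases h2 : (a :: b :: t).length = 2
    · match t with
      | [] => simp [dl, minNE]
      | _ :: _ => simp at h2
    · have hne : ¬((a :: b :: t).length = 0 ∨ (a :: b :: t).length = 1) := by omega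
      simp only [hne, if_false, h2, if_false]
      set n := (a :: b :: t).length with hn
      have hm : PySem.Int.floordiv (n : Int) 2 = ((n / 2 : Nat) : Int) := by
        exact_mod_cast PySem.Int.floordiv_natCast n 2
      rw [hm, show ((n / 2 : Nat) : Int) + 1 = (((n / 2 + 1 : Nat)) : Int) by push_cast; ring,
        PySem.List.slice_to_natCast, PySem.List.slice_from_natCast]
      have hL1 : 2 ≤ ((a :: b :: t).take (n / 2 + 1)).length := by
        simp only [List.length_take]; omega
      have hL2 : 2 ≤ ((a :: b :: t).drop (n / 2)).length := by
        simp only [List.length_drop]; omega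
      rw [A_eq_minNE _ hL1, A_eq_minNE _ hL2]
      have hdl1 : dl ((a :: b :: t).take (n / 2 + 1)) ≠ [] := by
        have := dl_length ((a :: b :: t).take (n / 2 + 1))
        intro hc; rw [hc] at this; simp at this; omega
      have hdl2 : dl ((a :: b :: t).drop (n / 2)) ≠ [] := by
        have := dl_length ((a :: b :: t).drop (n / 2))
        intro hc; rw [hc] at this; simp at this; omega
      rw [← minNE_append _ _ hdl1 hdl2, dl_split (a :: b :: t) (n / 2) (by omega) (by omega)]
termination_by xs.length
decreasing_by
  · simp only [List.length_take]; omega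
  · simp only [List.length_drop]; omega

theorem sdLoop_eq (best prev : Int) (xs : List Int) :
    sdLoop best prev xs = List.foldl min best (dl (prev :: xs)) := by
  induction xs generalizing best prev with
  | nil => simp [sdLoop, dl]
  | cons x rest ih =>
    rw [sdLoop, ih, dl]
    simp only [List.foldl_cons]
    congr 1
    rw [abs_sub_comm]
    simp only [min_def]
    split_ifs <;> omega

theorem B_eq_minNE (xs : List Int) (h : 2 ≤ xs.length) :
    smallest_diff_alt xs = minNE (dl xs) := by
  match xs with
  | a :: b :: t =>
    show sdLoop |b - a| b t = _
    rw [sdLoop_eq, abs_sub_comm b a]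
    show _ = minNE (|a - b| :: dl (b :: t))
    simp [minNE]

-- ===== VERDICT (by name: the statement is the Claim_ definition above) =====
theorem smallest_diff_spec : Claim_equal_smallest_diff := by
  intro numbers _
  unfold Spec_smallest_diff
  match numbers with
  | [] => rw [smallest_diff]; rfl
  | [a] => rw [smallest_diff]; rfl
  | a :: b :: t =>
    rw [A_eq_minNE _ (by simp), B_eq_minNE _ (by simp)]
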